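-- pv_equiv track=rewrite | github.com/donghyeon95/- | 6주차/심동민_풀이/matrix_Rotation.py | solution
-- ===== SOURCE A (Python) =====
-- def move(matrix, top, left, bottom, right):
--     temp = matrix[top][left]
--     min_value = temp
--
--     # 왼쪽
--     for x in range(top, bottom):
--         val = matrix[x+1][left]
--         matrix[x][left] = val
--
--         min_value = min(min_value, val)
--
--     # 하단
--     for y in range(left, right):
--         val = matrix[bottom][y+1]
--         matrix[bottom][y] = val
--
--         min_value = min(min_value, val)
--
--     # 오른쪽
--     for x in range(bottom, top, -1):
--         val = matrix[x-1][right]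
--         matrix[x][right] = val
--
--         min_value = min(min_value, val)
--
--     # 상단
--     for y in range(right, left, -1):
--         val = matrix[top][y-1]
--         matrix[top][y] = val
--
--         min_value = min(min_value, val)
--
--     matrix[top][left+1] = temp
--     return min_value
--
-- def solution(rows, columns, queries):
--     answer = []
--     matrix = []
--
--     num = 1
--     for i in range(rows):
--         row = [i for i in range(num, num+columns)]
--         matrix.append(row)
--         num += columns
--
--     for x1, y1, x2, y2 in queries:
--         answer.append(move(matrix, x1-1, y1-1, x2-1, y2-1))
--
--     return answer
-- ===== SOURCE B (Python) =====
-- def solution(rows, columns, queries):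
--     # B: build the matrix by closed form; per query read the clockwise perimeter,
--     # take its min, rotate it right by one and write it back.
--     matrix = [[i * columns + j + 1 for j in range(columns)] for i in range(rows)]
--     answer = []
--     for x1, y1, x2, y2 in queries:
--         t, l, b, r = x1 - 1, y1 - 1, x2 - 1, y2 - 1
--         coords = ([(t, y) for y in range(l, r)]
--                   + [(x, r) for x in range(t, b)]
--                   + [(b, y) for y in range(r, l, -1)]
--                   + [(x, l) for x in range(b, t, -1)])
--         vals = [matrix[x][y] for (x, y) in coords]
--         answer.append(min(vals))
--         rotated = [vals[-1]] + vals[:-1]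
--         for (x, y), v in zip(coords, rotated):
--             matrix[x][y] = v
--     return answer
-- ===== Notes on version B (the rewrite author's own statement) =====
-- stated objective: idiomatic
-- what changed: B builds the matrix by closed form and, per query, reads the ring's clockwise perimeter into one list, answers with min() of it, and writes the rotated-by-one list back, replacing A's four interleaved in-place shifting loops with running minimum.
-- outside the precondition, e.g. on solution(3, 3, [[1, 1, 1, 3], [1, 1, 3, 3]]): A returns [1, 1], B returns [1, 2]; on solution(2, 3, [[1, 1, 1, 1]]): A returns [1], B raises ValueError; on solution(2, 2, [[0, 1, 2, 2]]): A returns [1], B returns [1]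
import Mathlib
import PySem

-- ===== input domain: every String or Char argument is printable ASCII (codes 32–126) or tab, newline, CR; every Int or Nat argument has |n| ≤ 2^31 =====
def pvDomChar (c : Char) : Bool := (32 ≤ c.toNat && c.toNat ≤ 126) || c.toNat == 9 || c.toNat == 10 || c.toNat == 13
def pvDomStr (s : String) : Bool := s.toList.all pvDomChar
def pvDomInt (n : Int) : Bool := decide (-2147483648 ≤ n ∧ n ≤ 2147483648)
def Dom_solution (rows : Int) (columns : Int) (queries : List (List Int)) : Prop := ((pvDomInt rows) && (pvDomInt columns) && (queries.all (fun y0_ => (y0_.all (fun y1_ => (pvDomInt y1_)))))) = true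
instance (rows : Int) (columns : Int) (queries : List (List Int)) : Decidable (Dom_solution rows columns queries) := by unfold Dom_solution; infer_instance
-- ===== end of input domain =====

-- B reads each query ring's clockwise perimeter into one list, answers min() of it and writes the
-- rotated-by-one list back (closed-form matrix build), instead of A's four in-place shifting loops;
-- equivalence is about the return value (A mutates no caller data). Pre_ restricts queries to proper
-- in-bounds rectangles: elsewhere A raises or returns artefacts of its shifting loops.


-- ===== PORT A =====
-- shared Python-indexing helpers: m[x][y] read, and the statement m[x][y] = v
def pvGet2 (m : List (List Int)) (x y : Int) : Option Int :=
  (PySem.List.pyGet? m x).bind fun row => PySem.List.pyGet? row y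

def pvSet2 (m : List (List Int)) (x y v : Int) : Option (List (List Int)) :=
  (PySem.List.pyGet? m x).bind fun row =>
    (PySem.List.pySet? row y v).bind fun row' =>
      PySem.List.pySet? m x row'

-- move(matrix, top, left, bottom, right); the Option state is none exactly where Python raised
def move (m : List (List Int)) (top left bottom right : Int) :
    Option (List (List Int) × Int) :=
  (pvGet2 m top left).bind fun temp =>
  -- the four shifting loops, threaded in sequence (왼쪽, 하단, 오른쪽, 상단)
  ((PySem.List.pyRange right left (-1)).foldl
    (fun st y => st.bind fun p => (pvGet2 p.1 top (y - 1)).bind fun val =>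
      (pvSet2 p.1 top y val).map fun m' => (m', min p.2 val))
    ((PySem.List.pyRange bottom top (-1)).foldl
      (fun st x => st.bind fun p => (pvGet2 p.1 (x - 1) right).bind fun val =>
        (pvSet2 p.1 x right val).map fun m' => (m', min p.2 val))
      ((PySem.List.pyRange left right 1).foldl
        (fun st y => st.bind fun p => (pvGet2 p.1 bottom (y + 1)).bind fun val =>
          (pvSet2 p.1 bottom y val).map fun m' => (m', min p.2 val))
        ((PySem.List.pyRange top bottom 1).foldl
          (fun st x => st.bind fun p => (pvGet2 p.1 (x + 1) left).bind fun val =>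
            (pvSet2 p.1 x left val).map fun m' => (m', min p.2 val))
          (some (m, temp)))))).bind fun p =>
  (pvSet2 p.1 top (left + 1) temp).map fun m' => (m', p.2)

-- the matrix-building loop of solution (num starts at 1)
def buildA (rows columns : Int) : List (List Int) × Int :=
  (PySem.List.pyRange 0 rows 1).foldl
    (fun (st : List (List Int) × Int) _ =>
      (st.1 ++ [PySem.List.pyRange st.2 (st.2 + columns) 1], st.2 + columns)) ([], 1)

def solution (rows : Int) (columns : Int) (queries : List (List Int)) : List Int :=
  (Option.map (fun (p : List (List Int) × List Int) => p.2)
    (queries.foldl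
      (fun (st : Option (List (List Int) × List Int)) q => st.bind fun p =>
        match q with
        | [x1, y1, x2, y2] =>
            (move p.1 (x1 - 1) (y1 - 1) (x2 - 1) (y2 - 1)).map fun r => (r.1, p.2 ++ [r.2])
        | _ => none)
      (some ((buildA rows columns).1, [])))).getD []

-- ===== PORT B =====
-- B-side Python-indexing helpers (B's own copies: the ports share no definitions)
def pvGet2B (m : List (List Int)) (x y : Int) : Option Int :=
  (PySem.List.pyGet? m x).bind fun row => PySem.List.pyGet? row y

def pvSet2B (m : List (List Int)) (x y v : Int) : Option (List (List Int)) :=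
  (PySem.List.pyGet? m x).bind fun row =>
    (PySem.List.pySet? row y v).bind fun row' =>
      PySem.List.pySet? m x row'

-- perimeter of the ring (top,left,bottom,right), clockwise from the top-left corner
def pvCoords (t l b r : Int) : List (Int × Int) :=
  ((PySem.List.pyRange l r 1).map fun y => (t, y)) ++
  ((PySem.List.pyRange t b 1).map fun x => (x, r)) ++
  ((PySem.List.pyRange r l (-1)).map fun y => (b, y)) ++
  ((PySem.List.pyRange b t (-1)).map fun x => (x, l))

-- one query: read perimeter values, min them, write the rotated-by-one list back
def rotRing (m : List (List Int)) (t l b r : Int) : Option (List (List Int) × Int) :=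
  ((pvCoords t l b r).mapM fun c => pvGet2B m c.1 c.2).bind fun vals =>
  (PySem.List.min? vals (fun v => v)).bind fun mn =>
  (PySem.List.pyGet? vals (-1)).bind fun last =>
  ((((pvCoords t l b r).zip (last :: PySem.List.slice vals none (some (-1)))).foldl
      (fun st cv => st.bind fun mm => pvSet2B mm cv.1.1 cv.1.2 cv.2) (some m)).map
    fun m' => (m', mn))

def solution_alt (rows : Int) (columns : Int) (queries : List (List Int)) : List Int :=
  (Option.map (fun (p : List (List Int) × List Int) => p.2)
    (queries.foldl
      (fun (st : Option (List (List Int) × List Int)) q => st.bind fun p =>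
        -- 'x1, y1, x2, y2 = q' (ValueError unless exactly four entries)
        if q.length = 4 then
          (rotRing p.1 (q.getD 0 0 - 1) (q.getD 1 0 - 1) (q.getD 2 0 - 1)
            (q.getD 3 0 - 1)).map fun r => (r.1, p.2 ++ [r.2])
        else none)
      (some (((PySem.List.pyRange 0 rows 1).map fun i =>
        (PySem.List.pyRange 0 columns 1).map fun j => i * columns + j + 1), [])))).getD []

-- ===== PRECONDITION & SPEC =====
-- Pre_ excludes queries that are not proper in-bounds rectangles (malformed length, out of
-- bounds, or degenerate x1 ≥ x2 / y1 ≥ y2): on those A raises an IndexError/ValueError or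
-- returns values that are accidents of its shifting loops (negative-index wraparound,
-- self-overlapping shifts, the unconditional corner write), while B raises or rotates cleanly.
def Pre_solution (rows : Int) (columns : Int) (queries : List (List Int)) : Prop :=
  ∀ q ∈ queries, q.length = 4 ∧
    1 ≤ q.getD 0 0 ∧ q.getD 0 0 < q.getD 2 0 ∧ q.getD 2 0 ≤ rows ∧
    1 ≤ q.getD 1 0 ∧ q.getD 1 0 < q.getD 3 0 ∧ q.getD 3 0 ≤ columns
instance (rows : Int) (columns : Int) (queries : List (List Int)) : Decidable (Pre_solution rows columns queries) := by unfold Pre_solution; infer_instance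

def pvWitness_solution : Int × Int × List (List Int) := (3, 3, [[1, 1, 2, 3], [1, 2, 3, 3]])

def Spec_solution (rows : Int) (columns : Int) (queries : List (List Int)) (out : List Int) : Prop := out = solution_alt rows columns queries
instance (rows : Int) (columns : Int) (queries : List (List Int)) (out : List Int) : Decidable (Spec_solution rows columns queries out) := by unfold Spec_solution; infer_instance

-- ===== CLAIM (what is proved, stated in full; the proofs are below) =====
def Claim_equal_solution : Prop := ∀ (rows : Int) (columns : Int) (queries : List (List Int)), Dom_solution rows columns queries → Pre_solution rows columns queries → Spec_solution rows columns queries (solution rows columns queries)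

-- ===== LEMMAS AND PROOFS =====

-- the B-side helper copies compute the same functions
lemma pvGet2B_eq_pvGet2 : @pvGet2B = @pvGet2 := rfl
lemma pvSet2B_eq_pvSet2 : @pvSet2B = @pvSet2 := rfl

-- matrix-as-list primitives used only by the proofs
def pvEntry (m : List (List Int)) (x y : Int) : Int := (m.getD x.toNat []).getD y.toNat 0

def pvWr (m : List (List Int)) (x y v : Int) : List (List Int) :=
  m.set x.toNat ((m.getD x.toNat []).set y.toNat v)

def pvWrites (m : List (List Int)) (P : List ((Int × Int) × Int)) : List (List Int) :=
  P.foldl (fun mm pr => pvWr mm pr.1.1 pr.1.2 pr.2) m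

def pvShape (m : List (List Int)) (R C : Nat) : Prop :=
  m.length = R ∧ ∀ row ∈ m, row.length = C

def pvGood (R C : Nat) (p : Int × Int) : Prop :=
  0 ≤ p.1 ∧ p.1 < (R : Int) ∧ 0 ≤ p.2 ∧ p.2 < (C : Int)

lemma pvGet2_eq {m : List (List Int)} {R C : Nat} {x y : Int}
    (hm : pvShape m R C) (h : pvGood R C (x, y)) :
    pvGet2 m x y = some (pvEntry m x y) := by
  obtain ⟨hx0, hxR, hy0, hyC⟩ := h
  obtain ⟨hlen, hrow⟩ := hm
  have hx : x.toNat < m.length := by omega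
  have hylen : y.toNat < (m[x.toNat]'hx).length := by
    have := hrow _ (List.getElem_mem hx); omega
  rw [pvGet2, PySem.List.pyGet?_eq_some_getElem m hx0 (by push_cast [hlen]; omega),
    Option.bind_some, PySem.List.pyGet?_eq_some_getElem _ hy0 (by push_cast; omega),
    pvEntry, List.getD_eq_getElem m [] hx, List.getD_eq_getElem _ 0 hylen]

lemma pvSet2_eq {m : List (List Int)} {R C : Nat} {x y : Int} (v : Int)
    (hm : pvShape m R C) (h : pvGood R C (x, y)) :
    pvSet2 m x y v = some (pvWr m x y v) := by
  obtain ⟨hx0, hxR, hy0, hyC⟩ := h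
  obtain ⟨hlen, hrow⟩ := hm
  have hx : x.toNat < m.length := by omega
  have hylen : y.toNat < (m[x.toNat]'hx).length := by
    have := hrow _ (List.getElem_mem hx); omega
  have h2 := PySem.List.pySet?_natCast (m[x.toNat]'hx) y.toNat v hylen
  rw [Int.toNat_of_nonneg hy0] at h2
  have h3 := PySem.List.pySet?_natCast m x.toNat ((m[x.toNat]'hx).set y.toNat v) hx
  rw [Int.toNat_of_nonneg hx0] at h3
  rw [pvSet2, PySem.List.pyGet?_eq_some_getElem m hx0 (by push_cast [hlen]; omega),
    Option.bind_some, h2, Option.bind_some, h3, pvWr, List.getD_eq_getElem m [] hx]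

lemma pvShape_wr {m : List (List Int)} {R C : Nat} {x y v : Int}
    (hm : pvShape m R C) : pvShape (pvWr m x y v) R C := by
  obtain ⟨hlen, hrow⟩ := hm
  by_cases hx : x.toNat < m.length
  · refine ⟨by simp [pvWr, hlen], ?_⟩
    intro row hmem
    rcases List.mem_or_eq_of_mem_set hmem with h | h
    · exact hrow _ h
    · subst h
      rw [List.getD_eq_getElem m [] hx]
      simp [hrow _ (List.getElem_mem hx)]
  · rw [pvWr, List.set_eq_of_length_le (by omega)]
    exact ⟨hlen, hrow⟩

lemma pvEntry_wr_self {m : List (List Int)} {R C : Nat} {x y : Int} (v : Int)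
    (hm : pvShape m R C) (h : pvGood R C (x, y)) :
    pvEntry (pvWr m x y v) x y = v := by
  obtain ⟨hx0, hxR, hy0, hyC⟩ := h
  obtain ⟨hlen, hrow⟩ := hm
  have hx : x.toNat < m.length := by omega
  have hylen : y.toNat < (m[x.toNat]'hx).length := by
    have := hrow _ (List.getElem_mem hx); omega
  have hx' : x.toNat < (pvWr m x y v).length := by simp [pvWr]; omega
  rw [pvEntry, List.getD_eq_getElem _ [] hx']
  have : (pvWr m x y v)[x.toNat]'hx' = (m[x.toNat]'hx).set y.toNat v := by
    simp only [pvWr, List.getElem_set_self]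
    rw [List.getD_eq_getElem m [] hx]
  rw [this, List.getD_eq_getElem _ 0 (by simpa using hylen), List.getElem_set_self]

lemma pvEntry_wr_ne {m : List (List Int)} {x y v x' y' : Int}
    (hx0 : 0 ≤ x) (hy0 : 0 ≤ y) (hx0' : 0 ≤ x') (hy0' : 0 ≤ y')
    (hne : (x, y) ≠ (x', y')) :
    pvEntry (pvWr m x y v) x' y' = pvEntry m x' y' := by
  by_cases hxx : x = x'
  · subst hxx
    have hyy : y.toNat ≠ y'.toNat := by
      intro h; apply hne; have : y = y' := by omega
      rw [this]
    by_cases hx : x.toNat < m.length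
    · simp only [pvEntry, pvWr, List.getD_eq_getElem?_getD, List.getElem?_set_self hx,
        Option.getD_some, List.getElem?_eq_getElem hx, List.getElem?_set_ne hyy]
    · rw [pvEntry, pvEntry, pvWr, List.set_eq_of_length_le (by omega)]
  · have hne' : x.toNat ≠ x'.toNat := by omega
    simp only [pvEntry, pvWr, List.getD_eq_getElem?_getD, List.getElem?_set_ne hne']

lemma pvShape_writes {m : List (List Int)} {R C : Nat} {P : List ((Int × Int) × Int)}
    (hm : pvShape m R C) : pvShape (pvWrites m P) R C := by
  induction P generalizing m with
  | nil => exact hm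
  | cons p tl ih => exact ih (pvShape_wr hm)

lemma pvWrites_append (m : List (List Int)) (P Q : List ((Int × Int) × Int)) :
    pvWrites m (P ++ Q) = pvWrites (pvWrites m P) Q :=
  List.foldl_append

lemma pvEntry_writes_not_mem {m : List (List Int)} {P : List ((Int × Int) × Int)} {x y : Int}
    (hpos : ∀ pr ∈ P, 0 ≤ pr.1.1 ∧ 0 ≤ pr.1.2) (hx : 0 ≤ x) (hy : 0 ≤ y)
    (h : ∀ pr ∈ P, pr.1 ≠ (x, y)) :
    pvEntry (pvWrites m P) x y = pvEntry m x y := by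
  induction P generalizing m with
  | nil => rfl
  | cons p tl ih =>
      have := pvEntry_wr_ne (m := m) (v := p.2) (hpos p (by simp)).1 (hpos p (by simp)).2 hx hy
        (by have := h p (by simp); simpa using this)
      rw [pvWrites, List.foldl_cons, ← pvWrites, ih (fun pr hpr => hpos pr (by simp [hpr]))
        (fun pr hpr => h pr (by simp [hpr])), this]

lemma pvEntry_writes_mem {m : List (List Int)} {R C : Nat} {P : List ((Int × Int) × Int)}
    {x y v : Int} (hm : pvShape m R C) (hgood : ∀ pr ∈ P, pvGood R C pr.1)
    (hnd : P.Pairwise (fun a b => a.1 ≠ b.1)) (hmem : ((x, y), v) ∈ P) :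
    pvEntry (pvWrites m P) x y = v := by
  induction P generalizing m with
  | nil => simp at hmem
  | cons p tl ih =>
      rw [pvWrites, List.foldl_cons, ← pvWrites]
      rcases List.mem_cons.mp hmem with h | h
      · subst h
        have hx : pvGood R C (x, y) := hgood ((x, y), v) (by simp)
        have hne : ∀ pr ∈ tl, pr.1 ≠ (x, y) := by
          intro pr hpr
          have := (List.pairwise_cons.mp hnd).1 pr hpr
          simpa using this.symm
        rw [pvEntry_writes_not_mem (fun pr hpr => ⟨(hgood pr (by simp [hpr])).1,
          (hgood pr (by simp [hpr])).2.2.1⟩) hx.1 hx.2.2.1 hne]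
        exact pvEntry_wr_self v hm hx
      · exact ih (pvShape_wr hm) (fun pr hpr => hgood pr (by simp [hpr]))
          (List.pairwise_cons.mp hnd).2 h


lemma pvLoop_char {R C : Nat} (rd wr : Int → Int × Int) (xs : List Int) :
    ∀ (m : List (List Int)) (mn : Int),
    pvShape m R C →
    (∀ i ∈ xs, pvGood R C (rd i) ∧ pvGood R C (wr i)) →
    xs.Pairwise (fun i j => wr i ≠ rd j) →
    xs.foldl (fun st i => st.bind fun p => (pvGet2 p.1 (rd i).1 (rd i).2).bind fun val =>
        (pvSet2 p.1 (wr i).1 (wr i).2 val).map fun m' => (m', min p.2 val)) (some (m, mn))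
    = some (pvWrites m (xs.map fun i => (wr i, pvEntry m (rd i).1 (rd i).2)),
            (xs.map fun i => pvEntry m (rd i).1 (rd i).2).foldl min mn) := by
  induction xs with
  | nil => intro m mn _ _ _; simp [pvWrites]
  | cons i tl ih =>
      intro m mn hm hgood hpw
      have hgi := hgood i (by simp)
      have hrd : pvGet2 m (rd i).1 (rd i).2 = some (pvEntry m (rd i).1 (rd i).2) :=
        pvGet2_eq hm hgi.1
      have hwr : pvSet2 m (wr i).1 (wr i).2 (pvEntry m (rd i).1 (rd i).2)
          = some (pvWr m (wr i).1 (wr i).2 (pvEntry m (rd i).1 (rd i).2)) :=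
        pvSet2_eq _ hm hgi.2
      rw [List.foldl_cons]
      simp only [Option.bind_some, hrd, hwr, Option.map_some]
      rw [ih _ _ (pvShape_wr hm) (fun j hj => hgood j (by simp [hj]))
        (List.pairwise_cons.mp hpw).2]
      have hent : ∀ j ∈ tl, pvEntry (pvWr m (wr i).1 (wr i).2
            (pvEntry m (rd i).1 (rd i).2)) (rd j).1 (rd j).2
          = pvEntry m (rd j).1 (rd j).2 := by
        intro j hj
        exact pvEntry_wr_ne hgi.2.1 hgi.2.2.2.1 (hgood j (by simp [hj])).1.1
          (hgood j (by simp [hj])).1.2.2.1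
          (by have := (List.pairwise_cons.mp hpw).1 j hj
              simpa using this)
      rw [List.map_congr_left hent,
        List.map_congr_left (fun j hj => by rw [hent j hj] :
          ∀ j ∈ tl, (wr j, pvEntry (pvWr m (wr i).1 (wr i).2
            (pvEntry m (rd i).1 (rd i).2)) (rd j).1 (rd j).2)
            = (wr j, pvEntry m (rd j).1 (rd j).2))]
      simp [pvWrites, List.foldl_cons]

lemma pvWriteFold {R C : Nat} (Z : List ((Int × Int) × Int)) :
    ∀ (m : List (List Int)), pvShape m R C → (∀ p ∈ Z, pvGood R C p.1) →
    Z.foldl (fun st cv => st.bind fun mm => pvSet2 mm cv.1.1 cv.1.2 cv.2) (some m)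
      = some (pvWrites m Z) := by
  induction Z with
  | nil => intro m _ _; simp [pvWrites]
  | cons p tl ih =>
      intro m hm hgood
      rw [List.foldl_cons, Option.bind_some, pvSet2_eq _ hm (by simpa using hgood p (by simp)),
        ih _ (pvShape_wr hm) (fun q hq => hgood q (by simp [hq]))]
      rfl

lemma pvMapM_get2 {R C : Nat} (cs : List (Int × Int)) (m : List (List Int))
    (hm : pvShape m R C) (hgood : ∀ c ∈ cs, pvGood R C c) :
    (cs.mapM fun c => pvGet2 m c.1 c.2) = some (cs.map fun c => pvEntry m c.1 c.2) := by
  induction cs with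
  | nil => rfl
  | cons c tl ih =>
      rw [List.mapM_cons, pvGet2_eq hm (by simpa using hgood c (by simp)),
        ih (fun q hq => hgood q (by simp [hq]))]
      rfl

lemma pvWr_absorb (m : List (List Int)) (x y u v : Int) :
    pvWr (pvWr m x y u) x y v = pvWr m x y v := by
  by_cases hx : x.toNat < m.length
  · simp only [pvWr]
    rw [List.getD_eq_getElem m [] hx,
      List.getD_eq_getElem _ [] (by simpa using hx), List.getElem_set_self,
      List.set_set, List.set_set]
  · simp only [pvWr]
    rw [List.set_eq_of_length_le (l := m) (by omega), List.set_eq_of_length_le (l := m) (by omega)]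

def pvZipPred (l : List (Int × Int)) (c : Int × Int) : List ((Int × Int) × (Int × Int)) :=
  l.zip (c :: l.dropLast)

lemma pvZipPred_cons (x : Int × Int) (xs : List (Int × Int)) (c : Int × Int) :
    pvZipPred (x :: xs) c = (x, c) :: pvZipPred xs x := by
  cases xs <;> simp [pvZipPred]

lemma pvZipPred_append (A : List (Int × Int)) :
    ∀ (hA : A ≠ []) (B : List (Int × Int)) (c : Int × Int),
    pvZipPred (A ++ B) c = pvZipPred A c ++ pvZipPred B (A.getLast hA) := by
  induction A with
  | nil => intro hA; exact absurd rfl hA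
  | cons x xs ih =>
      intro hA B c
      cases xs with
      | nil =>
          rw [List.singleton_append, pvZipPred_cons]
          simp [pvZipPred]
      | cons y ys =>
          rw [show (x :: y :: ys) ++ B = x :: ((y :: ys) ++ B) from rfl, pvZipPred_cons,
            ih (by simp) B x, pvZipPred_cons x (y :: ys) c,
            List.getLast_cons (l := y :: ys) (by simp)]
          simp

lemma pvZipPred_map_range_asc (f : Int → Int × Int) (n : Nat) :
    ∀ (a b : Int) (c : Int × Int), b - a = n + 1 →
    pvZipPred ((PySem.List.pyRange a b 1).map f) c
      = (f a, c) :: (PySem.List.pyRange (a + 1) b 1).map (fun i => (f i, f (i - 1))) := by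
  induction n with
  | zero =>
      intro a b c hab
      rw [PySem.List.pyRange_one_cons (by omega), PySem.List.pyRange_one_eq_nil (by omega)]
      simp [pvZipPred]
  | succ n ih =>
      intro a b c hab
      rw [PySem.List.pyRange_one_cons (by omega), List.map_cons, pvZipPred_cons,
        ih (a + 1) b (f a) (by omega),
        PySem.List.pyRange_one_cons (a := a + 1) (by omega), List.map_cons]
      simp only [add_sub_cancel_right]

lemma pvZipPred_map_range_desc (f : Int → Int × Int) (n : Nat) :
    ∀ (a b : Int) (c : Int × Int), a - b = n + 1 →
    pvZipPred ((PySem.List.pyRange a b (-1)).map f) c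
      = (f a, c) :: (PySem.List.pyRange (a - 1) b (-1)).map (fun i => (f i, f (i + 1))) := by
  induction n with
  | zero =>
      intro a b c hab
      rw [PySem.List.pyRange_neg_one_cons (by omega), PySem.List.pyRange_neg_one_eq_nil (by omega)]
      simp [pvZipPred]
  | succ n ih =>
      intro a b c hab
      rw [PySem.List.pyRange_neg_one_cons (by omega), List.map_cons, pvZipPred_cons,
        ih (a - 1) b (f a) (by omega),
        PySem.List.pyRange_neg_one_cons (a := a - 1) (by omega), List.map_cons]
      simp only [sub_add_cancel]

lemma pvGetLast?_pyRange_asc {a b : Int} (h : a < b) :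
    (PySem.List.pyRange a b 1).getLast? = some (b - 1) := by
  have hb : b = (b - 1) + 1 := by ring
  rw [hb, PySem.List.pyRange_one_succ_right (by omega), List.getLast?_concat]
  simp

lemma pvGetLast?_pyRange_desc {a b : Int} (h : b < a) :
    (PySem.List.pyRange a b (-1)).getLast? = some (b + 1) := by
  rw [PySem.List.pyRange_neg_one_eq_reverse, List.getLast?_reverse]
  rw [PySem.List.pyRange_one_cons (by omega)]
  rfl

lemma pvFoldlMin_eq {l1 l2 : List Int} {a : Int}
    (h1 : ∀ v ∈ l1, v ∈ l2 ∨ v = a) (h2 : ∀ v ∈ l2, v ∈ l1 ∨ v = a) :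
    l1.foldl min a = l2.foldl min a := by
  have A1 := PySem.List.foldl_min_le l1 a
  have A2 := PySem.List.foldl_min_le l2 a
  apply le_antisymm
  · rcases PySem.List.foldl_min_mem l2 a with h | h
    · rw [h]; exact A1.1
    · rcases h2 _ h with hh | hh
      · exact A1.2 _ hh
      · rw [hh]; exact A1.1
  · rcases PySem.List.foldl_min_mem l1 a with h | h
    · rw [h]; exact A2.1
    · rcases h1 _ h with hh | hh
      · exact A2.2 _ hh
      · rw [hh]; exact A2.1

lemma pvEntry_natCast (m : List (List Int)) (i j : Nat) :
    pvEntry m (i : Int) (j : Int) = (m.getD i []).getD j 0 := by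
  simp [pvEntry]

lemma pvMat_ext {m1 m2 : List (List Int)} {R C : Nat}
    (h1 : pvShape m1 R C) (h2 : pvShape m2 R C)
    (h : ∀ x y : Nat, x < R → y < C → pvEntry m1 (x : Int) (y : Int) = pvEntry m2 (x : Int) (y : Int)) :
    m1 = m2 := by
  obtain ⟨hl1, hr1⟩ := h1
  obtain ⟨hl2, hr2⟩ := h2
  apply List.ext_getElem (by omega)
  intro i hi1 hi2
  apply List.ext_getElem (by rw [hr1 _ (List.getElem_mem hi1), hr2 _ (List.getElem_mem hi2)])
  intro j hj1 hj2
  have := h i j (by omega) (by rw [hr1 _ (List.getElem_mem hi1)] at hj1; omega)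
  rw [pvEntry_natCast, pvEntry_natCast, List.getD_eq_getElem _ [] hi1,
    List.getD_eq_getElem _ [] hi2, List.getD_eq_getElem _ 0 hj1, List.getD_eq_getElem _ 0 hj2] at this
  exact this


lemma pvPairwise_gt_pyRange_desc (a b : Int) :
    (PySem.List.pyRange a b (-1)).Pairwise (fun x y => y < x) := by
  rw [PySem.List.pyRange_neg_one_eq_reverse]
  exact List.pairwise_reverse.mpr (by simpa using PySem.List.pairwise_lt_pyRange_one (b+1) (a+1))

lemma pvPyRange_neg_split {a b : Int} (h : b < a) :
    PySem.List.pyRange a b (-1) = PySem.List.pyRange a (b + 1) (-1) ++ [b + 1] := by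
  rw [PySem.List.pyRange_neg_one_eq_reverse, PySem.List.pyRange_neg_one_eq_reverse,
    PySem.List.pyRange_one_cons (by omega), List.reverse_cons]

-- characterization of A's move on a proper ring
lemma moveA_char {R C : Nat} {m : List (List Int)} {t l b r : Int}
    (hm : pvShape m R C) (ht : 0 ≤ t) (htb : t < b) (hbR : b < (R : Int))
    (hl : 0 ≤ l) (hlr : l < r) (hrC : r < (C : Int)) :
    move m t l b r = some
      (pvWr (pvWrites (pvWrites (pvWrites (pvWrites m
          ((PySem.List.pyRange t b 1).map fun x => ((x, l), pvEntry m (x + 1) l)))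
          ((PySem.List.pyRange l r 1).map fun y => ((b, y), pvEntry m b (y + 1))))
          ((PySem.List.pyRange b t (-1)).map fun x => ((x, r), pvEntry m (x - 1) r)))
          ((PySem.List.pyRange r (l + 1) (-1)).map fun y => ((t, y), pvEntry m t (y - 1))))
          t (l + 1) (pvEntry m t l),
       ((((PySem.List.pyRange t b 1).map fun x => pvEntry m (x + 1) l) ++
         (((PySem.List.pyRange l r 1).map fun y => pvEntry m b (y + 1)) ++
          (((PySem.List.pyRange b t (-1)).map fun x => pvEntry m (x - 1) r) ++
           (((PySem.List.pyRange r (l + 1) (-1)).map fun y => pvEntry m t (y - 1)) ++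
            [pvEntry m (t + 1) l])))).foldl min (pvEntry m t l))) := by
  have hgoodtl : pvGood R C (t, l) := ⟨ht, by omega, hl, by omega⟩
  -- loop 1
  have h1 := pvLoop_char (R := R) (C := C) (fun x => (x + 1, l)) (fun x => (x, l))
    (PySem.List.pyRange t b 1) m (pvEntry m t l) hm
    (by intro i hi
        rw [PySem.List.mem_pyRange_one] at hi
        constructor <;> simp [pvGood] <;> omega)
    ((PySem.List.pairwise_lt_pyRange_one t b).imp (by intro i j hij; simp; omega))
  simp only at h1
  have hm1 : pvShape (pvWrites m ((PySem.List.pyRange t b 1).map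
      fun x => ((x, l), pvEntry m (x + 1) l))) R C := pvShape_writes hm
  -- loop 2 at m1, then value normalization
  have hP1keys : ∀ pr ∈ (PySem.List.pyRange t b 1).map (fun x => ((x, l), pvEntry m (x + 1) l)),
      0 ≤ pr.1.1 ∧ 0 ≤ pr.1.2 ∧ pr.1.1 < b ∧ pr.1.2 = l := by
    intro pr hpr
    rcases List.mem_map.mp hpr with ⟨x, hx, rfl⟩
    rw [PySem.List.mem_pyRange_one] at hx
    simp
    omega
  have hP2keys : ∀ pr ∈ (PySem.List.pyRange l r 1).map (fun y => ((b, y), pvEntry m b (y + 1))),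
      pr.1.1 = b ∧ l ≤ pr.1.2 ∧ pr.1.2 < r := by
    intro pr hpr
    rcases List.mem_map.mp hpr with ⟨y, hy, rfl⟩
    rw [PySem.List.mem_pyRange_one] at hy
    simp
    omega
  have hP3keys : ∀ pr ∈ (PySem.List.pyRange b t (-1)).map (fun x => ((x, r), pvEntry m (x - 1) r)),
      pr.1.2 = r ∧ t < pr.1.1 ∧ pr.1.1 ≤ b := by
    intro pr hpr
    rcases List.mem_map.mp hpr with ⟨x, hx, rfl⟩
    rw [PySem.List.mem_pyRange_neg_one] at hx
    simp
    omega
  have hP4keys : ∀ pr ∈ (PySem.List.pyRange r (l + 1) (-1)).map (fun y => ((t, y), pvEntry m t (y - 1))),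
      pr.1.1 = t ∧ l + 1 < pr.1.2 ∧ pr.1.2 ≤ r := by
    intro pr hpr
    rcases List.mem_map.mp hpr with ⟨y, hy, rfl⟩
    rw [PySem.List.mem_pyRange_neg_one] at hy
    simp
    omega
  have hm2 : pvShape (pvWrites (pvWrites m ((PySem.List.pyRange t b 1).map
      fun x => ((x, l), pvEntry m (x + 1) l)))
      ((PySem.List.pyRange l r 1).map fun y => ((b, y), pvEntry m b (y + 1)))) R C :=
    pvShape_writes hm1
  have hm3 : pvShape (pvWrites (pvWrites (pvWrites m ((PySem.List.pyRange t b 1).map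
      fun x => ((x, l), pvEntry m (x + 1) l)))
      ((PySem.List.pyRange l r 1).map fun y => ((b, y), pvEntry m b (y + 1))))
      ((PySem.List.pyRange b t (-1)).map fun x => ((x, r), pvEntry m (x - 1) r))) R C :=
    pvShape_writes hm2
  -- loop 2 at the matrix left by loop 1
  have h2 := pvLoop_char (R := R) (C := C) (fun y => (b, y + 1)) (fun y => (b, y))
    (PySem.List.pyRange l r 1)
    (pvWrites m ((PySem.List.pyRange t b 1).map fun x => ((x, l), pvEntry m (x + 1) l)))
    (((PySem.List.pyRange t b 1).map fun x => pvEntry m (x + 1) l).foldl min (pvEntry m t l))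
    hm1
    (by intro i hi
        rw [PySem.List.mem_pyRange_one] at hi
        constructor <;> simp [pvGood] <;> omega)
    ((PySem.List.pairwise_lt_pyRange_one l r).imp (by intro i j hij; simp; omega))
  simp only at h2
  -- normalize loop-2 reads to entries of the original matrix
  have e2 : ∀ y ∈ PySem.List.pyRange l r 1,
      pvEntry (pvWrites m ((PySem.List.pyRange t b 1).map
        fun x => ((x, l), pvEntry m (x + 1) l))) b (y + 1) = pvEntry m b (y + 1) := by
    intro y hy
    rw [PySem.List.mem_pyRange_one] at hy
    exact pvEntry_writes_not_mem
      (fun pr hpr => ⟨(hP1keys pr hpr).1, (hP1keys pr hpr).2.1⟩) (by omega) (by omega)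
      (fun pr hpr => by have := (hP1keys pr hpr).2.2.1; intro hc; rw [hc] at this; simp at this)
  rw [List.map_congr_left (fun y hy => by rw [e2 y hy] :
        ∀ y ∈ PySem.List.pyRange l r 1, ((b, y), pvEntry (pvWrites m ((PySem.List.pyRange t b 1).map
          fun x => ((x, l), pvEntry m (x + 1) l))) b (y + 1)) = ((b, y), pvEntry m b (y + 1))),
      List.map_congr_left e2] at h2
  -- loop 3
  have h3 := pvLoop_char (R := R) (C := C) (fun x => (x - 1, r)) (fun x => (x, r))
    (PySem.List.pyRange b t (-1))
    (pvWrites (pvWrites m ((PySem.List.pyRange t b 1).map fun x => ((x, l), pvEntry m (x + 1) l)))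
      ((PySem.List.pyRange l r 1).map fun y => ((b, y), pvEntry m b (y + 1))))
    (((PySem.List.pyRange l r 1).map fun y => pvEntry m b (y + 1)).foldl min
      (((PySem.List.pyRange t b 1).map fun x => pvEntry m (x + 1) l).foldl min (pvEntry m t l)))
    hm2
    (by intro i hi
        rw [PySem.List.mem_pyRange_neg_one] at hi
        constructor <;> simp [pvGood] <;> omega)
    ((pvPairwise_gt_pyRange_desc b t).imp (by intro i j hij; simp; omega))
  simp only at h3
  have e3 : ∀ x ∈ PySem.List.pyRange b t (-1),
      pvEntry (pvWrites (pvWrites m ((PySem.List.pyRange t b 1).map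
          fun x => ((x, l), pvEntry m (x + 1) l)))
        ((PySem.List.pyRange l r 1).map fun y => ((b, y), pvEntry m b (y + 1))))
        (x - 1) r = pvEntry m (x - 1) r := by
    intro x hx
    rw [PySem.List.mem_pyRange_neg_one] at hx
    rw [pvEntry_writes_not_mem
      (fun pr hpr => ⟨by rw [(hP2keys pr hpr).1]; omega, by have := (hP2keys pr hpr).2.1; omega⟩)
      (by omega) (by omega)
      (fun pr hpr => by have := (hP2keys pr hpr).2.2; intro hc; rw [hc] at this; simp at this)]
    exact pvEntry_writes_not_mem
      (fun pr hpr => ⟨(hP1keys pr hpr).1, (hP1keys pr hpr).2.1⟩) (by omega) (by omega)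
      (fun pr hpr => by have := (hP1keys pr hpr).2.2.2; intro hc; rw [hc] at this; simp at this; omega)
  rw [List.map_congr_left (fun x hx => by rw [e3 x hx] :
        ∀ x ∈ PySem.List.pyRange b t (-1), ((x, r), pvEntry (pvWrites (pvWrites m
          ((PySem.List.pyRange t b 1).map fun x => ((x, l), pvEntry m (x + 1) l)))
          ((PySem.List.pyRange l r 1).map fun y => ((b, y), pvEntry m b (y + 1)))) (x - 1) r)
          = ((x, r), pvEntry m (x - 1) r)),
      List.map_congr_left e3] at h3
  -- loop 4, over the part of the range above l+1
  have h4 := pvLoop_char (R := R) (C := C) (fun y => (t, y - 1)) (fun y => (t, y))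
    (PySem.List.pyRange r (l + 1) (-1))
    (pvWrites (pvWrites (pvWrites m ((PySem.List.pyRange t b 1).map
        fun x => ((x, l), pvEntry m (x + 1) l)))
      ((PySem.List.pyRange l r 1).map fun y => ((b, y), pvEntry m b (y + 1))))
      ((PySem.List.pyRange b t (-1)).map fun x => ((x, r), pvEntry m (x - 1) r)))
    (((PySem.List.pyRange b t (-1)).map fun x => pvEntry m (x - 1) r).foldl min
      (((PySem.List.pyRange l r 1).map fun y => pvEntry m b (y + 1)).foldl min
        (((PySem.List.pyRange t b 1).map fun x => pvEntry m (x + 1) l).foldl min (pvEntry m t l))))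
    hm3
    (by intro i hi
        rw [PySem.List.mem_pyRange_neg_one] at hi
        constructor <;> simp [pvGood] <;> omega)
    ((pvPairwise_gt_pyRange_desc r (l + 1)).imp (by intro i j hij; simp; omega))
  simp only at h4
  have e4 : ∀ y ∈ PySem.List.pyRange r (l + 1) (-1),
      pvEntry (pvWrites (pvWrites (pvWrites m ((PySem.List.pyRange t b 1).map
          fun x => ((x, l), pvEntry m (x + 1) l)))
        ((PySem.List.pyRange l r 1).map fun y => ((b, y), pvEntry m b (y + 1))))
        ((PySem.List.pyRange b t (-1)).map fun x => ((x, r), pvEntry m (x - 1) r)))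
        t (y - 1) = pvEntry m t (y - 1) := by
    intro y hy
    rw [PySem.List.mem_pyRange_neg_one] at hy
    rw [pvEntry_writes_not_mem
      (fun pr hpr => ⟨by have := (hP3keys pr hpr).2.1; omega, by rw [(hP3keys pr hpr).1]; omega⟩)
      (by omega) (by omega)
      (fun pr hpr => by have := (hP3keys pr hpr).2.1; intro hc; rw [hc] at this; simp at this)]
    rw [pvEntry_writes_not_mem
      (fun pr hpr => ⟨by rw [(hP2keys pr hpr).1]; omega, by have := (hP2keys pr hpr).2.1; omega⟩)
      (by omega) (by omega)
      (fun pr hpr => by have := (hP2keys pr hpr).1; intro hc; rw [hc] at this; simp at this; omega)]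
    exact pvEntry_writes_not_mem
      (fun pr hpr => ⟨(hP1keys pr hpr).1, (hP1keys pr hpr).2.1⟩) (by omega) (by omega)
      (fun pr hpr => by have := (hP1keys pr hpr).2.2.2; intro hc; rw [hc] at this; simp at this; omega)
  rw [List.map_congr_left (fun y hy => by rw [e4 y hy] :
        ∀ y ∈ PySem.List.pyRange r (l + 1) (-1), ((t, y), pvEntry (pvWrites (pvWrites (pvWrites m
          ((PySem.List.pyRange t b 1).map fun x => ((x, l), pvEntry m (x + 1) l)))
          ((PySem.List.pyRange l r 1).map fun y => ((b, y), pvEntry m b (y + 1))))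
          ((PySem.List.pyRange b t (-1)).map fun x => ((x, r), pvEntry m (x - 1) r))) t (y - 1))
          = ((t, y), pvEntry m t (y - 1))),
      List.map_congr_left e4] at h4
  -- the read in the last iteration of loop 4 hits the cell loop 1 rewrote
  have e5 : pvEntry (pvWrites (pvWrites (pvWrites (pvWrites m ((PySem.List.pyRange t b 1).map
        fun x => ((x, l), pvEntry m (x + 1) l)))
      ((PySem.List.pyRange l r 1).map fun y => ((b, y), pvEntry m b (y + 1))))
      ((PySem.List.pyRange b t (-1)).map fun x => ((x, r), pvEntry m (x - 1) r)))
      ((PySem.List.pyRange r (l + 1) (-1)).map fun y => ((t, y), pvEntry m t (y - 1))))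
      t l = pvEntry m (t + 1) l := by
    rw [pvEntry_writes_not_mem
      (fun pr hpr => ⟨by rw [(hP4keys pr hpr).1]; omega, by have := (hP4keys pr hpr).2.1; omega⟩)
      ht hl
      (fun pr hpr => by have := (hP4keys pr hpr).2.1; intro hc; rw [hc] at this; simp at this)]
    rw [pvEntry_writes_not_mem
      (fun pr hpr => ⟨by have := (hP3keys pr hpr).2.1; omega, by rw [(hP3keys pr hpr).1]; omega⟩)
      ht hl
      (fun pr hpr => by have := (hP3keys pr hpr).1; intro hc; rw [hc] at this; simp at this; omega)]
    rw [pvEntry_writes_not_mem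
      (fun pr hpr => ⟨by rw [(hP2keys pr hpr).1]; omega, by have := (hP2keys pr hpr).2.1; omega⟩)
      ht hl
      (fun pr hpr => by have := (hP2keys pr hpr).1; intro hc; rw [hc] at this; simp at this; omega)]
    exact pvEntry_writes_mem hm
      (by intro pr hpr
          have := hP1keys pr hpr
          exact ⟨this.1, by omega, by rw [this.2.2.2]; exact hl, by rw [this.2.2.2]; omega⟩)
      (List.pairwise_map.mpr ((PySem.List.pairwise_lt_pyRange_one t b).imp
        (by intro i j hij; simp; omega)))
      (List.mem_map.mpr ⟨t, PySem.List.mem_pyRange_one.mpr ⟨le_refl t, htb⟩, rfl⟩)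
  -- assemble
  unfold move
  rw [pvGet2_eq hm hgoodtl]
  simp only [Option.bind_some]
  rw [h1, h2, h3, pvPyRange_neg_split hlr, List.foldl_append, h4,
    List.foldl_cons, List.foldl_nil]
  simp only [Option.bind_some, add_sub_cancel_right]
  rw [pvGet2_eq (pvShape_writes hm3) ⟨ht, by omega, hl, by omega⟩, e5]
  simp only [Option.bind_some]
  rw [pvSet2_eq _ (pvShape_writes hm3) (⟨ht, by omega, by omega, by omega⟩ : pvGood R C (t, l + 1))]
  simp only [Option.map_some, Option.bind_some]
  rw [pvSet2_eq _ (pvShape_wr (pvShape_writes hm3))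
    (⟨ht, by omega, by omega, by omega⟩ : pvGood R C (t, l + 1))]
  simp only [Option.map_some, pvWr_absorb]
  rw [List.foldl_append, List.foldl_append, List.foldl_append, List.foldl_append,
    List.foldl_cons, List.foldl_nil]



-- characterization of B's rotRing on a proper ring
lemma rotB_char {R C : Nat} {m : List (List Int)} {t l b r : Int}
    (hm : pvShape m R C) (ht : 0 ≤ t) (htb : t < b) (hbR : b < (R : Int))
    (hl : 0 ≤ l) (hlr : l < r) (hrC : r < (C : Int)) :
    rotRing m t l b r = some
      (pvWrites (pvWrites (pvWrites (pvWrites m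
          (((t, l), pvEntry m (t + 1) l) ::
            (PySem.List.pyRange (l + 1) r 1).map fun y => ((t, y), pvEntry m t (y - 1))))
          (((t, r), pvEntry m t (r - 1)) ::
            (PySem.List.pyRange (t + 1) b 1).map fun x => ((x, r), pvEntry m (x - 1) r)))
          (((b, r), pvEntry m (b - 1) r) ::
            (PySem.List.pyRange (r - 1) l (-1)).map fun y => ((b, y), pvEntry m b (y + 1))))
          (((b, l), pvEntry m b (l + 1)) ::
            (PySem.List.pyRange (b - 1) t (-1)).map fun x => ((x, l), pvEntry m (x + 1) l)),
       (((((PySem.List.pyRange (l + 1) r 1).map fun y => pvEntry m t y) ++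
          ((PySem.List.pyRange t b 1).map fun x => pvEntry m x r)) ++
          ((PySem.List.pyRange r l (-1)).map fun y => pvEntry m b y)) ++
          ((PySem.List.pyRange b t (-1)).map fun x => pvEntry m x l)).foldl min
         (pvEntry m t l)) := by
  have hcoords : ∀ c ∈ pvCoords t l b r, pvGood R C c := by
    intro c hc
    rw [pvCoords] at hc
    rcases List.mem_append.mp hc with h123 | hL
    · rcases List.mem_append.mp h123 with h12 | hBo
      · rcases List.mem_append.mp h12 with hT | hR
        · rcases List.mem_map.mp hT with ⟨y, hy, rfl⟩
          rw [PySem.List.mem_pyRange_one] at hy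
          exact ⟨by omega, by omega, by omega, by omega⟩
        · rcases List.mem_map.mp hR with ⟨x, hx, rfl⟩
          rw [PySem.List.mem_pyRange_one] at hx
          exact ⟨by omega, by omega, by omega, by omega⟩
      · rcases List.mem_map.mp hBo with ⟨y, hy, rfl⟩
        rw [PySem.List.mem_pyRange_neg_one] at hy
        exact ⟨by omega, by omega, by omega, by omega⟩
    · rcases List.mem_map.mp hL with ⟨x, hx, rfl⟩
      rw [PySem.List.mem_pyRange_neg_one] at hx
      exact ⟨by omega, by omega, by omega, by omega⟩
  have hLlast : ((PySem.List.pyRange b t (-1)).map fun x => ((x : Int), l)).getLast?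
      = some (t + 1, l) := by
    rw [List.getLast?_map, pvGetLast?_pyRange_desc htb]
    rfl
  have hlast : (pvCoords t l b r).getLast? = some (t + 1, l) := by
    rw [pvCoords, List.getLast?_append, hLlast]
    rfl
  have hvals : ((pvCoords t l b r).mapM fun c => pvGet2 m c.1 c.2)
      = some ((pvCoords t l b r).map fun c => pvEntry m c.1 c.2) :=
    pvMapM_get2 _ m hm hcoords
  unfold rotRing
  simp only [pvGet2B_eq_pvGet2, pvSet2B_eq_pvSet2]
  rw [hvals]
  simp only [Option.bind_some]
  have hcons : pvCoords t l b r = (t, l) ::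
      (((((PySem.List.pyRange (l + 1) r 1).map fun y => ((t : Int), y)) ++
         ((PySem.List.pyRange t b 1).map fun x => ((x : Int), r))) ++
        ((PySem.List.pyRange r l (-1)).map fun y => ((b : Int), y))) ++
       ((PySem.List.pyRange b t (-1)).map fun x => ((x : Int), l))) := by
    rw [pvCoords, PySem.List.pyRange_one_cons hlr, List.map_cons, List.cons_append,
      List.cons_append, List.cons_append]
  have hmin : PySem.List.min? ((pvCoords t l b r).map fun c => pvEntry m c.1 c.2) (fun v => v)
      = some ((((((((PySem.List.pyRange (l + 1) r 1).map fun y => ((t : Int), y)) ++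
         ((PySem.List.pyRange t b 1).map fun x => ((x : Int), r))) ++
        ((PySem.List.pyRange r l (-1)).map fun y => ((b : Int), y))) ++
       ((PySem.List.pyRange b t (-1)).map fun x => ((x : Int), l)))).map fun c => pvEntry m c.1 c.2).foldl min (pvEntry m t l)) := by
    rw [hcons, List.map_cons, PySem.List.min?_id_cons]
  rw [hmin]
  simp only [Option.bind_some]
  have hgetlast : PySem.List.pyGet? ((pvCoords t l b r).map fun c => pvEntry m c.1 c.2) (-1)
      = some (pvEntry m (t + 1) l) := by
    rw [PySem.List.pyGet?_neg_one, List.getLast?_map, hlast]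
    rfl
  rw [hgetlast]
  simp only [Option.bind_some]
  rw [PySem.List.slice_to_neg_one, ← List.map_dropLast]
  rw [show (pvEntry m (t + 1) l :: List.map (fun c => pvEntry m c.1 c.2) (pvCoords t l b r).dropLast)
      = List.map (fun c => pvEntry m c.1 c.2) ((t + 1, l) :: (pvCoords t l b r).dropLast) by rw [List.map_cons]]
  rw [List.zip_map_right]
  have hPBgood : ∀ p ∈ ((pvCoords t l b r).zip ((t + 1, l) :: (pvCoords t l b r).dropLast)).map
      (Prod.map id fun c => pvEntry m c.1 c.2), pvGood R C p.1 := by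
    intro p hp
    rcases List.mem_map.mp hp with ⟨q, hq, rfl⟩
    have hq1 : q.1 ∈ pvCoords t l b r := by
      rcases q with ⟨q1, q2⟩
      exact (List.of_mem_zip hq).1
    rw [Prod.map_fst]
    exact hcoords _ hq1
  rw [pvWriteFold _ m hm hPBgood]
  simp only [Option.map_some]
  -- nonemptiness of the segments
  have hTne : ((PySem.List.pyRange l r 1).map fun y => ((t : Int), y)) ≠ [] := by
    rw [PySem.List.pyRange_one_cons hlr]; simp
  have hRne : ((PySem.List.pyRange t b 1).map fun x => ((x : Int), r)) ≠ [] := by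
    rw [PySem.List.pyRange_one_cons htb]; simp
  have hBone : ((PySem.List.pyRange r l (-1)).map fun y => ((b : Int), y)) ≠ [] := by
    rw [PySem.List.pyRange_neg_one_cons hlr]; simp
  -- last elements of the segments
  have hTlast : ∀ h, (((PySem.List.pyRange l r 1).map fun y => ((t : Int), y)).getLast h)
      = (t, r - 1) := fun h => List.getLast_of_mem_getLast?
    (by rw [List.getLast?_map, pvGetLast?_pyRange_asc hlr]; rfl)
  have hRlast : ∀ h, (((PySem.List.pyRange t b 1).map fun x => ((x : Int), r)).getLast h)
      = (b - 1, r) := fun h => List.getLast_of_mem_getLast?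
    (by rw [List.getLast?_map, pvGetLast?_pyRange_asc htb]; rfl)
  have hBolast : ∀ h, (((PySem.List.pyRange r l (-1)).map fun y => ((b : Int), y)).getLast h)
      = (b, l + 1) := fun h => List.getLast_of_mem_getLast?
    (by rw [List.getLast?_map, pvGetLast?_pyRange_desc hlr]; rfl)
  -- decompose the predecessor-zip of the perimeter into its four ring sides
  have hZ : pvZipPred (pvCoords t l b r) (t + 1, l)
      = ((pvZipPred ((PySem.List.pyRange l r 1).map fun y => ((t : Int), y)) (t + 1, l) ++
          pvZipPred ((PySem.List.pyRange t b 1).map fun x => ((x : Int), r)) (t, r - 1)) ++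
         pvZipPred ((PySem.List.pyRange r l (-1)).map fun y => ((b : Int), y)) (b - 1, r)) ++
        pvZipPred ((PySem.List.pyRange b t (-1)).map fun x => ((x : Int), l)) (b, l + 1) := by
    rw [pvCoords, pvZipPred_append _ (by simp [hTne]) _ _,
      pvZipPred_append _ (by simp [hTne]) _ _, pvZipPred_append _ hTne _ _,
      List.getLast_append_of_ne_nil, List.getLast_append_of_ne_nil, hBolast, hRlast, hTlast]
    all_goals first
      | exact hTne | exact hRne | exact hBone
  rw [show ((pvCoords t l b r).zip ((t + 1, l) :: (pvCoords t l b r).dropLast))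
      = pvZipPred (pvCoords t l b r) (t + 1, l) from rfl, hZ]
  rw [pvZipPred_map_range_asc _ (r - l - 1).toNat l r _ (by omega),
    pvZipPred_map_range_asc _ (b - t - 1).toNat t b _ (by omega),
    pvZipPred_map_range_desc _ (r - l - 1).toNat r l _ (by omega),
    pvZipPred_map_range_desc _ (b - t - 1).toNat b t _ (by omega)]
  simp only [List.map_append, List.map_cons, List.map_map, pvWrites_append]
  simp [Function.comp_def, Prod.map]



lemma pvMin_eq {m : List (List Int)} {t l b r : Int}
    (htb : t < b) (_hlr : l < r) :
    ((((PySem.List.pyRange t b 1).map fun x => pvEntry m (x + 1) l) ++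
      (((PySem.List.pyRange l r 1).map fun y => pvEntry m b (y + 1)) ++
       (((PySem.List.pyRange b t (-1)).map fun x => pvEntry m (x - 1) r) ++
        (((PySem.List.pyRange r (l + 1) (-1)).map fun y => pvEntry m t (y - 1)) ++
         [pvEntry m (t + 1) l])))).foldl min (pvEntry m t l))
    = (((((PySem.List.pyRange (l + 1) r 1).map fun y => pvEntry m t y) ++
         ((PySem.List.pyRange t b 1).map fun x => pvEntry m x r)) ++
         ((PySem.List.pyRange r l (-1)).map fun y => pvEntry m b y)) ++
         ((PySem.List.pyRange b t (-1)).map fun x => pvEntry m x l)).foldl min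
        (pvEntry m t l) := by
  apply pvFoldlMin_eq
  · intro v hv
    simp only [List.mem_append, List.mem_map, List.mem_singleton,
      PySem.List.mem_pyRange_one, PySem.List.mem_pyRange_neg_one] at hv ⊢
    rcases hv with ⟨a, ⟨h1, h2⟩, rfl⟩ | ⟨a, ⟨h1, h2⟩, rfl⟩ | ⟨a, ⟨h1, h2⟩, rfl⟩ |
      ⟨a, ⟨h1, h2⟩, rfl⟩ | hv5
    · exact Or.inl (Or.inr ⟨a + 1, ⟨by omega, by omega⟩, rfl⟩)
    · exact Or.inl (Or.inl (Or.inr ⟨a + 1, ⟨by omega, by omega⟩, rfl⟩))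
    · exact Or.inl (Or.inl (Or.inl (Or.inr ⟨a - 1, ⟨by omega, by omega⟩, rfl⟩)))
    · exact Or.inl (Or.inl (Or.inl (Or.inl ⟨a - 1, ⟨by omega, by omega⟩, rfl⟩)))
    · exact Or.inl (Or.inr ⟨t + 1, ⟨by omega, by omega⟩, hv5.symm⟩)
  · intro v hv
    simp only [List.mem_append, List.mem_map, List.mem_singleton,
      PySem.List.mem_pyRange_one, PySem.List.mem_pyRange_neg_one] at hv ⊢
    rcases hv with ⟨⟨⟨a, ⟨h1, h2⟩, rfl⟩ | ⟨a, ⟨h1, h2⟩, rfl⟩⟩ | ⟨a, ⟨h1, h2⟩, rfl⟩⟩ |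
      ⟨a, ⟨h1, h2⟩, rfl⟩
    · exact Or.inl (Or.inr (Or.inr (Or.inr (Or.inl ⟨a + 1, ⟨by omega, by omega⟩,
        by rw [add_sub_cancel_right]⟩))))
    · exact Or.inl (Or.inr (Or.inr (Or.inl ⟨a + 1, ⟨by omega, by omega⟩,
        by rw [add_sub_cancel_right]⟩)))
    · exact Or.inl (Or.inr (Or.inl ⟨a - 1, ⟨by omega, by omega⟩, by rw [sub_add_cancel]⟩))
    · exact Or.inl (Or.inl ⟨a - 1, ⟨by omega, by omega⟩, by rw [sub_add_cancel]⟩)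


-- canonical description of the rotated ring
def pvRingVal (m : List (List Int)) (t l b r x y : Int) : Int :=
  if x = t ∧ y = l then pvEntry m (t + 1) l
  else if x = t ∧ l < y ∧ y ≤ r then pvEntry m t (y - 1)
  else if y = r ∧ t < x ∧ x ≤ b then pvEntry m (x - 1) r
  else if x = b ∧ l ≤ y ∧ y < r then pvEntry m b (y + 1)
  else if y = l ∧ t < x ∧ x < b then pvEntry m (x + 1) l
  else pvEntry m x y

lemma pvEntryA {R C : Nat} {m : List (List Int)} {t l b r x y : Int}
    (hm : pvShape m R C) (ht : 0 ≤ t) (htb : t < b) (hbR : b < (R : Int))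
    (hl : 0 ≤ l) (hlr : l < r) (hrC : r < (C : Int))
    (hx : 0 ≤ x) (hxR : x < (R : Int)) (hy : 0 ≤ y) (hyC : y < (C : Int)) :
    pvEntry (pvWr (pvWrites (pvWrites (pvWrites (pvWrites m
        ((PySem.List.pyRange t b 1).map fun x => ((x, l), pvEntry m (x + 1) l)))
        ((PySem.List.pyRange l r 1).map fun y => ((b, y), pvEntry m b (y + 1))))
        ((PySem.List.pyRange b t (-1)).map fun x => ((x, r), pvEntry m (x - 1) r)))
        ((PySem.List.pyRange r (l + 1) (-1)).map fun y => ((t, y), pvEntry m t (y - 1))))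
        t (l + 1) (pvEntry m t l)) x y
    = pvRingVal m t l b r x y := by
  have hk1 : ∀ pr ∈ (PySem.List.pyRange t b 1).map (fun x => ((x, l), pvEntry m (x + 1) l)),
      pr.1.2 = l ∧ t ≤ pr.1.1 ∧ pr.1.1 < b := by
    intro pr hpr
    rcases List.mem_map.mp hpr with ⟨i, hi, rfl⟩
    rw [PySem.List.mem_pyRange_one] at hi
    simp
    omega
  have hk2 : ∀ pr ∈ (PySem.List.pyRange l r 1).map (fun y => ((b, y), pvEntry m b (y + 1))),
      pr.1.1 = b ∧ l ≤ pr.1.2 ∧ pr.1.2 < r := by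
    intro pr hpr
    rcases List.mem_map.mp hpr with ⟨i, hi, rfl⟩
    rw [PySem.List.mem_pyRange_one] at hi
    simp
    omega
  have hk3 : ∀ pr ∈ (PySem.List.pyRange b t (-1)).map (fun x => ((x, r), pvEntry m (x - 1) r)),
      pr.1.2 = r ∧ t < pr.1.1 ∧ pr.1.1 ≤ b := by
    intro pr hpr
    rcases List.mem_map.mp hpr with ⟨i, hi, rfl⟩
    rw [PySem.List.mem_pyRange_neg_one] at hi
    simp
    omega
  have hk4 : ∀ pr ∈ (PySem.List.pyRange r (l + 1) (-1)).map
      (fun y => ((t, y), pvEntry m t (y - 1))),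
      pr.1.1 = t ∧ l + 1 < pr.1.2 ∧ pr.1.2 ≤ r := by
    intro pr hpr
    rcases List.mem_map.mp hpr with ⟨i, hi, rfl⟩
    rw [PySem.List.mem_pyRange_neg_one] at hi
    simp
    omega
  have hpos1 : ∀ pr ∈ (PySem.List.pyRange t b 1).map
      (fun x => ((x, l), pvEntry m (x + 1) l)), 0 ≤ pr.1.1 ∧ 0 ≤ pr.1.2 := by
    intro pr hpr
    have := hk1 pr hpr
    exact ⟨by omega, by omega⟩
  have hpos2 : ∀ pr ∈ (PySem.List.pyRange l r 1).map
      (fun y => ((b, y), pvEntry m b (y + 1))), 0 ≤ pr.1.1 ∧ 0 ≤ pr.1.2 := by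
    intro pr hpr
    have := hk2 pr hpr
    exact ⟨by omega, by omega⟩
  have hpos3 : ∀ pr ∈ (PySem.List.pyRange b t (-1)).map
      (fun x => ((x, r), pvEntry m (x - 1) r)), 0 ≤ pr.1.1 ∧ 0 ≤ pr.1.2 := by
    intro pr hpr
    have := hk3 pr hpr
    exact ⟨by omega, by omega⟩
  have hpos4 : ∀ pr ∈ (PySem.List.pyRange r (l + 1) (-1)).map
      (fun y => ((t, y), pvEntry m t (y - 1))), 0 ≤ pr.1.1 ∧ 0 ≤ pr.1.2 := by
    intro pr hpr
    have := hk4 pr hpr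
    exact ⟨by omega, by omega⟩
  have hW1 : pvShape (pvWrites m ((PySem.List.pyRange t b 1).map
      fun x => ((x, l), pvEntry m (x + 1) l))) R C := pvShape_writes hm
  have hW2 : pvShape (pvWrites (pvWrites m ((PySem.List.pyRange t b 1).map
      fun x => ((x, l), pvEntry m (x + 1) l)))
      ((PySem.List.pyRange l r 1).map fun y => ((b, y), pvEntry m b (y + 1)))) R C :=
    pvShape_writes hW1
  have hW3 : pvShape (pvWrites (pvWrites (pvWrites m ((PySem.List.pyRange t b 1).map
      fun x => ((x, l), pvEntry m (x + 1) l)))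
      ((PySem.List.pyRange l r 1).map fun y => ((b, y), pvEntry m b (y + 1))))
      ((PySem.List.pyRange b t (-1)).map fun x => ((x, r), pvEntry m (x - 1) r))) R C :=
    pvShape_writes hW2
  have hW4 : pvShape (pvWrites (pvWrites (pvWrites (pvWrites m ((PySem.List.pyRange t b 1).map
      fun x => ((x, l), pvEntry m (x + 1) l)))
      ((PySem.List.pyRange l r 1).map fun y => ((b, y), pvEntry m b (y + 1))))
      ((PySem.List.pyRange b t (-1)).map fun x => ((x, r), pvEntry m (x - 1) r)))
      ((PySem.List.pyRange r (l + 1) (-1)).map fun y => ((t, y), pvEntry m t (y - 1)))) R C :=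
    pvShape_writes hW3
  by_cases hc1 : x = t ∧ y = l + 1
  · obtain ⟨rfl, rfl⟩ := hc1
    rw [pvEntry_wr_self _ hW4 ⟨ht, by omega, by omega, by omega⟩]
    rw [pvRingVal, if_neg (by omega), if_pos ⟨rfl, by omega, by omega⟩, add_sub_cancel_right]
  rw [pvEntry_wr_ne ht (by omega) hx hy (by simp; omega)]
  by_cases hc2 : x = t ∧ l + 2 ≤ y ∧ y ≤ r
  · obtain ⟨hxt, hy1, hy2⟩ := hc2
    rw [hxt]
    rw [pvEntry_writes_mem (P := (PySem.List.pyRange r (l + 1) (-1)).map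
        fun y => ((t, y), pvEntry m t (y - 1))) hW3 (by
        intro pr hpr
        have := hk4 pr hpr
        exact ⟨by omega, by omega, by omega, by omega⟩)
      (List.pairwise_map.mpr ((pvPairwise_gt_pyRange_desc r (l + 1)).imp
        (by intro i j hij; simp; omega)))
      (List.mem_map.mpr ⟨y, PySem.List.mem_pyRange_neg_one.mpr ⟨by omega, by omega⟩, rfl⟩)]
    rw [pvRingVal, if_neg (by omega), if_pos ⟨rfl, by omega, by omega⟩]
  rw [pvEntry_writes_not_mem hpos4 hx hy (by
    intro pr hpr
    have := hk4 pr hpr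
    intro hc
    rw [hc] at this
    omega)]
  by_cases hc3 : y = r ∧ t + 1 ≤ x ∧ x ≤ b
  · obtain ⟨hyr, hx1, hx2⟩ := hc3
    rw [hyr]
    rw [pvEntry_writes_mem (P := (PySem.List.pyRange b t (-1)).map
        fun x => ((x, r), pvEntry m (x - 1) r)) hW2 (by
        intro pr hpr
        have := hk3 pr hpr
        exact ⟨by omega, by omega, by omega, by omega⟩)
      (List.pairwise_map.mpr ((pvPairwise_gt_pyRange_desc b t).imp
        (by intro i j hij; simp; omega)))
      (List.mem_map.mpr ⟨x, PySem.List.mem_pyRange_neg_one.mpr ⟨by omega, by omega⟩, rfl⟩)]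
    rw [pvRingVal, if_neg (by omega), if_neg (by omega), if_pos ⟨rfl, by omega, by omega⟩]
  rw [pvEntry_writes_not_mem hpos3 hx hy (by
    intro pr hpr
    have := hk3 pr hpr
    intro hc
    rw [hc] at this
    omega)]
  by_cases hc4 : x = b ∧ l ≤ y ∧ y ≤ r - 1
  · obtain ⟨hxb, hy1, hy2⟩ := hc4
    rw [hxb]
    rw [pvEntry_writes_mem (P := (PySem.List.pyRange l r 1).map
        fun y => ((b, y), pvEntry m b (y + 1))) hW1 (by
        intro pr hpr
        have := hk2 pr hpr
        exact ⟨by omega, by omega, by omega, by omega⟩)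
      (List.pairwise_map.mpr ((PySem.List.pairwise_lt_pyRange_one l r).imp
        (by intro i j hij; simp; omega)))
      (List.mem_map.mpr ⟨y, PySem.List.mem_pyRange_one.mpr ⟨by omega, by omega⟩, rfl⟩)]
    rw [pvRingVal, if_neg (by omega), if_neg (by omega), if_neg (by omega),
      if_pos ⟨rfl, by omega, by omega⟩]
  rw [pvEntry_writes_not_mem hpos2 hx hy (by
    intro pr hpr
    have := hk2 pr hpr
    intro hc
    rw [hc] at this
    omega)]
  by_cases hc5 : y = l ∧ t ≤ x ∧ x ≤ b - 1
  · obtain ⟨hyl, hx1, hx2⟩ := hc5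
    rw [hyl]
    rw [pvEntry_writes_mem (P := (PySem.List.pyRange t b 1).map
        fun x => ((x, l), pvEntry m (x + 1) l)) hm (by
        intro pr hpr
        have := hk1 pr hpr
        exact ⟨by omega, by omega, by omega, by omega⟩)
      (List.pairwise_map.mpr ((PySem.List.pairwise_lt_pyRange_one t b).imp
        (by intro i j hij; simp; omega)))
      (List.mem_map.mpr ⟨x, PySem.List.mem_pyRange_one.mpr ⟨by omega, by omega⟩, rfl⟩)]
    by_cases hxt : x = t
    · rw [hxt, pvRingVal, if_pos ⟨rfl, rfl⟩]
    · rw [pvRingVal, if_neg (by omega), if_neg (by omega), if_neg (by omega),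
        if_neg (by omega), if_pos ⟨rfl, by omega, by omega⟩]
  rw [pvEntry_writes_not_mem hpos1 hx hy (by
    intro pr hpr
    have := hk1 pr hpr
    intro hc
    rw [hc] at this
    omega)]
  rw [pvRingVal, if_neg (by omega), if_neg (by omega), if_neg (by omega),
    if_neg (by omega), if_neg (by omega)]


lemma pvEntryB {R C : Nat} {m : List (List Int)} {t l b r x y : Int}
    (hm : pvShape m R C) (ht : 0 ≤ t) (htb : t < b) (hbR : b < (R : Int))
    (hl : 0 ≤ l) (hlr : l < r) (hrC : r < (C : Int))
    (hx : 0 ≤ x) (_hxR : x < (R : Int)) (hy : 0 ≤ y) (_hyC : y < (C : Int)) :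
    pvEntry (pvWrites (pvWrites (pvWrites (pvWrites m
        (((t, l), pvEntry m (t + 1) l) ::
          (PySem.List.pyRange (l + 1) r 1).map fun y => ((t, y), pvEntry m t (y - 1))))
        (((t, r), pvEntry m t (r - 1)) ::
          (PySem.List.pyRange (t + 1) b 1).map fun x => ((x, r), pvEntry m (x - 1) r)))
        (((b, r), pvEntry m (b - 1) r) ::
          (PySem.List.pyRange (r - 1) l (-1)).map fun y => ((b, y), pvEntry m b (y + 1))))
        (((b, l), pvEntry m b (l + 1)) ::
          (PySem.List.pyRange (b - 1) t (-1)).map fun x => ((x, l), pvEntry m (x + 1) l))) x y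
    = pvRingVal m t l b r x y := by
  have hkT : ∀ pr ∈ (((t, l), pvEntry m (t + 1) l) ::
      (PySem.List.pyRange (l + 1) r 1).map fun y => ((t, y), pvEntry m t (y - 1))),
      pr.1.1 = t ∧ l ≤ pr.1.2 ∧ pr.1.2 ≤ r - 1 := by
    intro pr hpr
    rcases List.mem_cons.mp hpr with rfl | h
    · simp; omega
    · rcases List.mem_map.mp h with ⟨i, hi, rfl⟩
      rw [PySem.List.mem_pyRange_one] at hi
      simp; omega
  have hkR : ∀ pr ∈ (((t, r), pvEntry m t (r - 1)) ::
      (PySem.List.pyRange (t + 1) b 1).map fun x => ((x, r), pvEntry m (x - 1) r)),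
      pr.1.2 = r ∧ t ≤ pr.1.1 ∧ pr.1.1 ≤ b - 1 := by
    intro pr hpr
    rcases List.mem_cons.mp hpr with rfl | h
    · simp; omega
    · rcases List.mem_map.mp h with ⟨i, hi, rfl⟩
      rw [PySem.List.mem_pyRange_one] at hi
      simp; omega
  have hkBo : ∀ pr ∈ (((b, r), pvEntry m (b - 1) r) ::
      (PySem.List.pyRange (r - 1) l (-1)).map fun y => ((b, y), pvEntry m b (y + 1))),
      pr.1.1 = b ∧ l + 1 ≤ pr.1.2 ∧ pr.1.2 ≤ r := by
    intro pr hpr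
    rcases List.mem_cons.mp hpr with rfl | h
    · simp; omega
    · rcases List.mem_map.mp h with ⟨i, hi, rfl⟩
      rw [PySem.List.mem_pyRange_neg_one] at hi
      simp; omega
  have hkL : ∀ pr ∈ (((b, l), pvEntry m b (l + 1)) ::
      (PySem.List.pyRange (b - 1) t (-1)).map fun x => ((x, l), pvEntry m (x + 1) l)),
      pr.1.2 = l ∧ t + 1 ≤ pr.1.1 ∧ pr.1.1 ≤ b := by
    intro pr hpr
    rcases List.mem_cons.mp hpr with rfl | h
    · simp; omega
    · rcases List.mem_map.mp h with ⟨i, hi, rfl⟩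
      rw [PySem.List.mem_pyRange_neg_one] at hi
      simp; omega
  have hgT : ∀ pr ∈ (((t, l), pvEntry m (t + 1) l) ::
      (PySem.List.pyRange (l + 1) r 1).map fun y => ((t, y), pvEntry m t (y - 1))),
      pvGood R C pr.1 := by
    intro pr hpr
    have := hkT pr hpr
    exact ⟨by omega, by omega, by omega, by omega⟩
  have hgR : ∀ pr ∈ (((t, r), pvEntry m t (r - 1)) ::
      (PySem.List.pyRange (t + 1) b 1).map fun x => ((x, r), pvEntry m (x - 1) r)),
      pvGood R C pr.1 := by
    intro pr hpr
    have := hkR pr hpr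
    exact ⟨by omega, by omega, by omega, by omega⟩
  have hgBo : ∀ pr ∈ (((b, r), pvEntry m (b - 1) r) ::
      (PySem.List.pyRange (r - 1) l (-1)).map fun y => ((b, y), pvEntry m b (y + 1))),
      pvGood R C pr.1 := by
    intro pr hpr
    have := hkBo pr hpr
    exact ⟨by omega, by omega, by omega, by omega⟩
  have hgL : ∀ pr ∈ (((b, l), pvEntry m b (l + 1)) ::
      (PySem.List.pyRange (b - 1) t (-1)).map fun x => ((x, l), pvEntry m (x + 1) l)),
      pvGood R C pr.1 := by
    intro pr hpr
    have := hkL pr hpr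
    exact ⟨by omega, by omega, by omega, by omega⟩
  have hpwT : (((t, l), pvEntry m (t + 1) l) ::
      (PySem.List.pyRange (l + 1) r 1).map fun y => ((t, y), pvEntry m t (y - 1))).Pairwise
      (fun a b => a.1 ≠ b.1) := by
    refine List.pairwise_cons.mpr ⟨?_, ?_⟩
    · intro pr hpr
      rcases List.mem_map.mp hpr with ⟨i, hi, rfl⟩
      rw [PySem.List.mem_pyRange_one] at hi
      simp; omega
    · exact List.pairwise_map.mpr ((PySem.List.pairwise_lt_pyRange_one (l + 1) r).imp
        (by intro i j hij; simp; omega))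
  have hpwR : (((t, r), pvEntry m t (r - 1)) ::
      (PySem.List.pyRange (t + 1) b 1).map fun x => ((x, r), pvEntry m (x - 1) r)).Pairwise
      (fun a b => a.1 ≠ b.1) := by
    refine List.pairwise_cons.mpr ⟨?_, ?_⟩
    · intro pr hpr
      rcases List.mem_map.mp hpr with ⟨i, hi, rfl⟩
      rw [PySem.List.mem_pyRange_one] at hi
      simp; omega
    · exact List.pairwise_map.mpr ((PySem.List.pairwise_lt_pyRange_one (t + 1) b).imp
        (by intro i j hij; simp; omega))
  have hpwBo : (((b, r), pvEntry m (b - 1) r) ::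
      (PySem.List.pyRange (r - 1) l (-1)).map fun y => ((b, y), pvEntry m b (y + 1))).Pairwise
      (fun a b => a.1 ≠ b.1) := by
    refine List.pairwise_cons.mpr ⟨?_, ?_⟩
    · intro pr hpr
      rcases List.mem_map.mp hpr with ⟨i, hi, rfl⟩
      rw [PySem.List.mem_pyRange_neg_one] at hi
      simp; omega
    · exact List.pairwise_map.mpr ((pvPairwise_gt_pyRange_desc (r - 1) l).imp
        (by intro i j hij; simp; omega))
  have hpwL : (((b, l), pvEntry m b (l + 1)) ::
      (PySem.List.pyRange (b - 1) t (-1)).map fun x => ((x, l), pvEntry m (x + 1) l)).Pairwise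
      (fun a b => a.1 ≠ b.1) := by
    refine List.pairwise_cons.mpr ⟨?_, ?_⟩
    · intro pr hpr
      rcases List.mem_map.mp hpr with ⟨i, hi, rfl⟩
      rw [PySem.List.mem_pyRange_neg_one] at hi
      simp; omega
    · exact List.pairwise_map.mpr ((pvPairwise_gt_pyRange_desc (b - 1) t).imp
        (by intro i j hij; simp; omega))
  have hWT : pvShape (pvWrites m (((t, l), pvEntry m (t + 1) l) ::
      (PySem.List.pyRange (l + 1) r 1).map fun y => ((t, y), pvEntry m t (y - 1)))) R C :=
    pvShape_writes hm
  have hWR : pvShape (pvWrites (pvWrites m (((t, l), pvEntry m (t + 1) l) ::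
      (PySem.List.pyRange (l + 1) r 1).map fun y => ((t, y), pvEntry m t (y - 1))))
      (((t, r), pvEntry m t (r - 1)) ::
        (PySem.List.pyRange (t + 1) b 1).map fun x => ((x, r), pvEntry m (x - 1) r))) R C :=
    pvShape_writes hWT
  have hWBo : pvShape (pvWrites (pvWrites (pvWrites m (((t, l), pvEntry m (t + 1) l) ::
      (PySem.List.pyRange (l + 1) r 1).map fun y => ((t, y), pvEntry m t (y - 1))))
      (((t, r), pvEntry m t (r - 1)) ::
        (PySem.List.pyRange (t + 1) b 1).map fun x => ((x, r), pvEntry m (x - 1) r)))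
      (((b, r), pvEntry m (b - 1) r) ::
        (PySem.List.pyRange (r - 1) l (-1)).map fun y => ((b, y), pvEntry m b (y + 1)))) R C :=
    pvShape_writes hWR
  by_cases hd1 : y = l ∧ t + 1 ≤ x ∧ x ≤ b
  · obtain ⟨hyl, hx1, hx2⟩ := hd1
    rw [hyl]
    by_cases hxb : x = b
    · rw [hxb]
      rw [pvEntry_writes_mem (P := ((b, l), pvEntry m b (l + 1)) ::
          (PySem.List.pyRange (b - 1) t (-1)).map fun x => ((x, l), pvEntry m (x + 1) l))
        hWBo hgL hpwL (List.mem_cons_self)]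
      rw [pvRingVal, if_neg (by omega), if_neg (by omega), if_neg (by omega),
        if_pos ⟨rfl, by omega, by omega⟩]
    · rw [pvEntry_writes_mem (P := ((b, l), pvEntry m b (l + 1)) ::
          (PySem.List.pyRange (b - 1) t (-1)).map fun x => ((x, l), pvEntry m (x + 1) l))
        hWBo hgL hpwL (List.mem_cons_of_mem _ (List.mem_map.mpr
          ⟨x, PySem.List.mem_pyRange_neg_one.mpr ⟨by omega, by omega⟩, rfl⟩))]
      rw [pvRingVal, if_neg (by omega), if_neg (by omega), if_neg (by omega),
        if_neg (by omega), if_pos ⟨rfl, by omega, by omega⟩]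
  rw [pvEntry_writes_not_mem (fun pr hpr => ⟨by have := hkL pr hpr; omega,
      by have := hkL pr hpr; omega⟩) hx hy (by
    intro pr hpr
    have := hkL pr hpr
    intro hc
    rw [hc] at this
    omega)]
  by_cases hd2 : x = b ∧ l + 1 ≤ y ∧ y ≤ r
  · obtain ⟨hxb, hy1, hy2⟩ := hd2
    rw [hxb]
    by_cases hyr : y = r
    · rw [hyr]
      rw [pvEntry_writes_mem (P := ((b, r), pvEntry m (b - 1) r) ::
          (PySem.List.pyRange (r - 1) l (-1)).map fun y => ((b, y), pvEntry m b (y + 1)))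
        hWR hgBo hpwBo (List.mem_cons_self)]
      rw [pvRingVal, if_neg (by omega), if_neg (by omega), if_pos ⟨rfl, by omega, by omega⟩]
    · rw [pvEntry_writes_mem (P := ((b, r), pvEntry m (b - 1) r) ::
          (PySem.List.pyRange (r - 1) l (-1)).map fun y => ((b, y), pvEntry m b (y + 1)))
        hWR hgBo hpwBo (List.mem_cons_of_mem _ (List.mem_map.mpr
          ⟨y, PySem.List.mem_pyRange_neg_one.mpr ⟨by omega, by omega⟩, rfl⟩))]
      rw [pvRingVal, if_neg (by omega), if_neg (by omega), if_neg (by omega),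
        if_pos ⟨rfl, by omega, by omega⟩]
  rw [pvEntry_writes_not_mem (fun pr hpr => ⟨by have := hkBo pr hpr; omega,
      by have := hkBo pr hpr; omega⟩) hx hy (by
    intro pr hpr
    have := hkBo pr hpr
    intro hc
    rw [hc] at this
    omega)]
  by_cases hd3 : y = r ∧ t ≤ x ∧ x ≤ b - 1
  · obtain ⟨hyr, hx1, hx2⟩ := hd3
    rw [hyr]
    by_cases hxt : x = t
    · rw [hxt]
      rw [pvEntry_writes_mem (P := ((t, r), pvEntry m t (r - 1)) ::
          (PySem.List.pyRange (t + 1) b 1).map fun x => ((x, r), pvEntry m (x - 1) r))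
        hWT hgR hpwR (List.mem_cons_self)]
      rw [pvRingVal, if_neg (by omega), if_pos ⟨rfl, by omega, by omega⟩]
    · rw [pvEntry_writes_mem (P := ((t, r), pvEntry m t (r - 1)) ::
          (PySem.List.pyRange (t + 1) b 1).map fun x => ((x, r), pvEntry m (x - 1) r))
        hWT hgR hpwR (List.mem_cons_of_mem _ (List.mem_map.mpr
          ⟨x, PySem.List.mem_pyRange_one.mpr ⟨by omega, by omega⟩, rfl⟩))]
      rw [pvRingVal, if_neg (by omega), if_neg (by omega), if_pos ⟨rfl, by omega, by omega⟩]
  rw [pvEntry_writes_not_mem (fun pr hpr => ⟨by have := hkR pr hpr; omega,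
      by have := hkR pr hpr; omega⟩) hx hy (by
    intro pr hpr
    have := hkR pr hpr
    intro hc
    rw [hc] at this
    omega)]
  by_cases hd4 : x = t ∧ l ≤ y ∧ y ≤ r - 1
  · obtain ⟨hxt, hy1, hy2⟩ := hd4
    rw [hxt]
    by_cases hyl : y = l
    · rw [hyl]
      rw [pvEntry_writes_mem (P := ((t, l), pvEntry m (t + 1) l) ::
          (PySem.List.pyRange (l + 1) r 1).map fun y => ((t, y), pvEntry m t (y - 1)))
        hm hgT hpwT (List.mem_cons_self)]
      rw [pvRingVal, if_pos ⟨rfl, rfl⟩]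
    · rw [pvEntry_writes_mem (P := ((t, l), pvEntry m (t + 1) l) ::
          (PySem.List.pyRange (l + 1) r 1).map fun y => ((t, y), pvEntry m t (y - 1)))
        hm hgT hpwT (List.mem_cons_of_mem _ (List.mem_map.mpr
          ⟨y, PySem.List.mem_pyRange_one.mpr ⟨by omega, by omega⟩, rfl⟩))]
      rw [pvRingVal, if_neg (by omega), if_pos ⟨rfl, by omega, by omega⟩]
  rw [pvEntry_writes_not_mem (fun pr hpr => ⟨by have := hkT pr hpr; omega,
      by have := hkT pr hpr; omega⟩) hx hy (by
    intro pr hpr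
    have := hkT pr hpr
    intro hc
    rw [hc] at this
    omega)]
  rw [pvRingVal, if_neg (by omega), if_neg (by omega), if_neg (by omega),
    if_neg (by omega), if_neg (by omega)]


-- the two per-query transformations agree on a proper in-bounds ring
lemma pvStep_eq {R C : Nat} {m : List (List Int)} {t l b r : Int}
    (hm : pvShape m R C) (ht : 0 ≤ t) (htb : t < b) (hbR : b < (R : Int))
    (hl : 0 ≤ l) (hlr : l < r) (hrC : r < (C : Int)) :
    ∃ M mn, move m t l b r = some (M, mn) ∧ rotRing m t l b r = some (M, mn) ∧
      pvShape M R C := by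
  have hA := moveA_char hm ht htb hbR hl hlr hrC
  have hB := rotB_char hm ht htb hbR hl hlr hrC
  have hmat : pvWr (pvWrites (pvWrites (pvWrites (pvWrites m
        ((PySem.List.pyRange t b 1).map fun x => ((x, l), pvEntry m (x + 1) l)))
        ((PySem.List.pyRange l r 1).map fun y => ((b, y), pvEntry m b (y + 1))))
        ((PySem.List.pyRange b t (-1)).map fun x => ((x, r), pvEntry m (x - 1) r)))
        ((PySem.List.pyRange r (l + 1) (-1)).map fun y => ((t, y), pvEntry m t (y - 1))))
        t (l + 1) (pvEntry m t l)
      = pvWrites (pvWrites (pvWrites (pvWrites m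
        (((t, l), pvEntry m (t + 1) l) ::
          (PySem.List.pyRange (l + 1) r 1).map fun y => ((t, y), pvEntry m t (y - 1))))
        (((t, r), pvEntry m t (r - 1)) ::
          (PySem.List.pyRange (t + 1) b 1).map fun x => ((x, r), pvEntry m (x - 1) r)))
        (((b, r), pvEntry m (b - 1) r) ::
          (PySem.List.pyRange (r - 1) l (-1)).map fun y => ((b, y), pvEntry m b (y + 1))))
        (((b, l), pvEntry m b (l + 1)) ::
          (PySem.List.pyRange (b - 1) t (-1)).map fun x => ((x, l), pvEntry m (x + 1) l)) := by
    apply pvMat_ext (R := R) (C := C)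
      (pvShape_wr (pvShape_writes (pvShape_writes (pvShape_writes (pvShape_writes hm)))))
      (pvShape_writes (pvShape_writes (pvShape_writes (pvShape_writes hm))))
    intro x y hxR hyC
    rw [pvEntryA hm ht htb hbR hl hlr hrC (by omega) (by omega) (by omega) (by omega),
      pvEntryB hm ht htb hbR hl hlr hrC (by omega) (by omega) (by omega) (by omega)]
  refine ⟨_, _, hA, ?_, pvShape_wr (pvShape_writes (pvShape_writes (pvShape_writes
    (pvShape_writes hm))))⟩
  rw [hB, hmat, pvMin_eq htb hlr]

-- validity of one query against the matrix dimensions (mirrors Pre_solution)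
def pvQok (R C : Nat) (q : List Int) : Prop :=
  q.length = 4 ∧ 1 ≤ q.getD 0 0 ∧ q.getD 0 0 < q.getD 2 0 ∧ q.getD 2 0 ≤ (R : Int) ∧
    1 ≤ q.getD 1 0 ∧ q.getD 1 0 < q.getD 3 0 ∧ q.getD 3 0 ≤ (C : Int)

lemma pvFold_eq {R C : Nat} (qs : List (List Int)) :
    ∀ (m : List (List Int)) (ans : List Int), pvShape m R C → (∀ q ∈ qs, pvQok R C q) →
    qs.foldl (fun (st : Option (List (List Int) × List Int)) q => st.bind fun p =>
        match q with
        | [x1, y1, x2, y2] =>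
            (move p.1 (x1 - 1) (y1 - 1) (x2 - 1) (y2 - 1)).map fun r => (r.1, p.2 ++ [r.2])
        | _ => none) (some (m, ans))
    = qs.foldl (fun (st : Option (List (List Int) × List Int)) q => st.bind fun p =>
        if q.length = 4 then
          (rotRing p.1 (q.getD 0 0 - 1) (q.getD 1 0 - 1) (q.getD 2 0 - 1)
            (q.getD 3 0 - 1)).map fun r => (r.1, p.2 ++ [r.2])
        else none) (some (m, ans)) := by
  induction qs with
  | nil => intro m ans _ _; rfl
  | cons q tl ih =>
      intro m ans hm hq
      have hq0 := hq q (by simp)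
      obtain ⟨x1, y1, x2, y2, rfl⟩ : ∃ x1 y1 x2 y2, q = [x1, y1, x2, y2] := by
        have hlen := hq0.1
        rcases q with _ | ⟨a, _ | ⟨b', _ | ⟨c, _ | ⟨d, _ | ⟨x, e⟩⟩⟩⟩⟩
        · simp at hlen
        · simp at hlen
        · simp at hlen
        · simp at hlen
        · exact ⟨a, b', c, d, rfl⟩
        · simp at hlen
      simp only [pvQok, List.getD_cons_zero, List.getD_cons_succ] at hq0
      simp only [List.foldl_cons, Option.bind_some, List.length_cons, List.length_nil,
        if_pos rfl, List.getD_cons_zero, List.getD_cons_succ]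
      obtain ⟨M, mn, hmv, hrt, hsh⟩ := pvStep_eq (t := x1 - 1) (l := y1 - 1)
        (b := x2 - 1) (r := y2 - 1) hm (by omega) (by omega) (by omega) (by omega)
        (by omega) (by omega)
      rw [hmv, hrt]
      simp only [Option.map_some]
      exact ih M (ans ++ [mn]) hsh (fun qq hqq => hq qq (by simp [hqq]))

lemma pvBuild_aux (columns : Int) : ∀ (n : Nat) (k : Int) (acc : List (List Int)),
    (PySem.List.pyRange k (k + n) 1).foldl
      (fun (st : List (List Int) × Int) _ =>
        (st.1 ++ [PySem.List.pyRange st.2 (st.2 + columns) 1], st.2 + columns))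
      (acc, k * columns + 1)
    = (acc ++ (PySem.List.pyRange k (k + n) 1).map
        (fun i => PySem.List.pyRange (i * columns + 1) (i * columns + 1 + columns) 1),
       (k + n) * columns + 1) := by
  intro n
  induction n with
  | zero =>
      intro k acc
      rw [PySem.List.pyRange_one_eq_nil (by omega)]
      simp
  | succ n ih =>
      intro k acc
      rw [PySem.List.pyRange_one_cons (by omega), List.foldl_cons, List.map_cons]
      have h1 : k * columns + 1 + columns = (k + 1) * columns + 1 := by ring
      have h3 : (k + (((n : Nat) + 1 : Nat) : Int)) = (k + 1) + ((n : Nat) : Int) := by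
        push_cast; ring
      dsimp only
      rw [h3, h1, ih (k + 1) (acc ++ [PySem.List.pyRange (k * columns + 1)
        ((k + 1) * columns + 1) 1]), List.append_assoc, List.singleton_append]

lemma pvBuild_eq (rows columns : Int) :
    (buildA rows columns).1 = (PySem.List.pyRange 0 rows 1).map fun i =>
      (PySem.List.pyRange 0 columns 1).map fun j => i * columns + j + 1 := by
  by_cases hrows : rows ≤ 0
  · rw [buildA, PySem.List.pyRange_one_eq_nil (by omega)]
    rfl
  · have h0 : rows = 0 + ((rows.toNat : Nat) : Int) := by omega
    rw [buildA, show (([] : List (List Int)), (1 : Int))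
        = (([] : List (List Int)), 0 * columns + 1) by norm_num, h0,
      pvBuild_aux columns rows.toNat 0 []]
    dsimp only
    rw [List.nil_append]
    apply List.map_congr_left
    intro i hi
    rw [PySem.List.mem_pyRange_one] at hi
    rw [PySem.List.pyRange_one (i * columns + 1), PySem.List.pyRange_one 0 columns,
      List.map_map]
    have h4 : (i * columns + 1 + columns - (i * columns + 1)) = columns := by ring
    rw [h4, show (columns - 0) = columns by ring]
    apply List.map_congr_left
    intro a _
    simp
    ring

lemma pvBuild_shape (rows columns : Int) :
    pvShape ((PySem.List.pyRange 0 rows 1).map fun i =>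
      (PySem.List.pyRange 0 columns 1).map fun j => i * columns + j + 1)
      rows.toNat columns.toNat := by
  constructor
  · rw [List.length_map, PySem.List.length_pyRange_one]
    omega
  · intro row hrow
    rcases List.mem_map.mp hrow with ⟨i, _, rfl⟩
    rw [List.length_map, PySem.List.length_pyRange_one]
    omega

-- ===== VERDICT (by name: the statement is the Claim_ definition above) =====
theorem solution_spec : Claim_equal_solution := by
  intro rows columns queries _ hpre
  unfold Spec_solution solution solution_alt
  rw [pvBuild_eq rows columns]
  rw [pvFold_eq (R := rows.toNat) (C := columns.toNat) queries _ []
    (pvBuild_shape rows columns) ?_]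
  intro q hq
  have := hpre q hq
  exact ⟨this.1, by omega, by omega, by omega, by omega, by omega, by omega⟩
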